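-- pv_equiv track=rewrite | github.com/Sashobrine/Python-core | main/module6_function2/lab/task3.py | counter_of_list
-- ===== SOURCE A (Python) =====
-- def counter_of_list(lst):
--     neg_num = 0
--     pos_num = 0
--     even_num = 0
--     odd_num = 0
--
--     for i in lst:
--         if i >= 0:
--             pos_num += 1
--         elif i < 0:
--             neg_num += 1
--
--         if i % 2 == 0:
--             even_num += 1
--         else:
--             odd_num += 1
--
--     return neg_num, pos_num, even_num, odd_num
-- ===== SOURCE B (Python) =====
-- def counter_of_list(lst):
--     neg_num = sum(1 for i in lst if i < 0)
--     pos_num = sum(1 for i in lst if i >= 0)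
--     even_num = sum(1 for i in lst if i % 2 == 0)
--     odd_num = sum(1 for i in lst if i % 2 != 0)
--     return neg_num, pos_num, even_num, odd_num
-- ===== Notes on version B (the rewrite author's own statement) =====
-- stated objective: alternative
-- what changed: Replaced the single loop maintaining four counters with four independent one-predicate reductions (one sum per category).
import Mathlib
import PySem

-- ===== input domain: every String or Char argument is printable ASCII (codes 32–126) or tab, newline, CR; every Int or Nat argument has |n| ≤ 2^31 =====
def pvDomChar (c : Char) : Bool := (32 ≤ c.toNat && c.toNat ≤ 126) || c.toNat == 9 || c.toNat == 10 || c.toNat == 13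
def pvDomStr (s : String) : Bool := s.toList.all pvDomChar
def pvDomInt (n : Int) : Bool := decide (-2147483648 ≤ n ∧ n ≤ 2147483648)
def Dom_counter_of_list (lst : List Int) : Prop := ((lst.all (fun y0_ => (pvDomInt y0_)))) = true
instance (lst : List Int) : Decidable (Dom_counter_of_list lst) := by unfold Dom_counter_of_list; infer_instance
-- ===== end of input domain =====

-- B replaces A's single four-counter loop by four independent one-predicate reductions (alternative decomposition, same cost).

-- ===== PORT A =====
-- A: one pass over lst, state (neg, pos, even, odd) updated per element (if/elif, then if/else), as in the Python loop.
def counter_of_list (lst : List Int) : Int × Int × Int × Int :=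
  lst.foldl
    (fun (st : Int × Int × Int × Int) i =>
      let np : Int × Int :=
        if i ≥ 0 then (st.1, st.2.1 + 1)
        else if i < 0 then (st.1 + 1, st.2.1)
        else (st.1, st.2.1)
      let eo : Int × Int :=
        if PySem.Int.mod i 2 = 0 then (st.2.2.1 + 1, st.2.2.2)
        else (st.2.2.1, st.2.2.2 + 1)
      (np.1, np.2, eo.1, eo.2))
    (0, 0, 0, 0)

-- ===== PORT B =====
-- B: four separate scans, each counting one predicate, i.e. sum(1 for i in lst if p(i)).
def counter_of_list_alt (lst : List Int) : Int × Int × Int × Int :=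
  ((lst.countP (fun i => i < 0) : Int),
   (lst.countP (fun i => i ≥ 0) : Int),
   (lst.countP (fun i => PySem.Int.mod i 2 = 0) : Int),
   (lst.countP (fun i => ¬ PySem.Int.mod i 2 = 0) : Int))

-- ===== PRECONDITION & SPEC =====
def Spec_counter_of_list (lst : List Int) (out : Int × Int × Int × Int) : Prop := out = counter_of_list_alt lst
instance (lst : List Int) (out : Int × Int × Int × Int) : Decidable (Spec_counter_of_list lst out) := by unfold Spec_counter_of_list; infer_instance

-- ===== CLAIM (what is proved, stated in full; the proofs are below) =====
def Claim_equal_counter_of_list : Prop := ∀ (lst : List Int), Dom_counter_of_list lst → Spec_counter_of_list lst (counter_of_list lst)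

-- ===== LEMMAS AND PROOFS =====
theorem counter_of_list_loop (lst : List Int) (neg pos even odd : Int) :
    lst.foldl
      (fun (st : Int × Int × Int × Int) i =>
        let np : Int × Int :=
          if i ≥ 0 then (st.1, st.2.1 + 1)
          else if i < 0 then (st.1 + 1, st.2.1)
          else (st.1, st.2.1)
        let eo : Int × Int :=
          if PySem.Int.mod i 2 = 0 then (st.2.2.1 + 1, st.2.2.2)
          else (st.2.2.1, st.2.2.2 + 1)
        (np.1, np.2, eo.1, eo.2))
      (neg, pos, even, odd)
    = (neg + (lst.countP (fun i => i < 0) : Int),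
       pos + (lst.countP (fun i => i ≥ 0) : Int),
       even + (lst.countP (fun i => PySem.Int.mod i 2 = 0) : Int),
       odd + (lst.countP (fun i => ¬ PySem.Int.mod i 2 = 0) : Int)) := by
  induction lst generalizing neg pos even odd with
  | nil => simp
  | cons x xs ih =>
    rw [List.foldl_cons, ih]
    simp only [List.countP_cons]
    by_cases hx : x ≥ 0 <;> by_cases he : (2:Int) ∣ x
    · have h2 : x % 2 ≠ 1 := by omega
      simp [hx, he, h2, not_lt.mpr hx]
      omega
    · have h2 : x % 2 = 1 := by omega
      simp [hx, he, h2, not_lt.mpr hx]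
      omega
    · have h2 : x % 2 ≠ 1 := by omega
      simp [hx, he, h2, not_le.mp hx]
      omega
    · have h2 : x % 2 = 1 := by omega
      simp [hx, he, h2, not_le.mp hx]
      omega

-- ===== VERDICT (by name: the statement is the Claim_ definition above) =====
theorem counter_of_list_spec : Claim_equal_counter_of_list := by
  intro lst _
  unfold Spec_counter_of_list
  show counter_of_list lst = counter_of_list_alt lst
  unfold counter_of_list counter_of_list_alt
  rw [counter_of_list_loop]
  norm_num
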